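-- pv_equiv track=rewrite | github.com/linshuijin6/replicaLT | rebuild_core_split_subject_disjoint.py | summarize_tracer
-- ===== SOURCE A (Python) =====
-- from typing import Dict, List, Tuple
--
-- def summarize_tracer(items: List[Dict]) -> Dict[str, int]:
--     def valid(path: str) -> bool:
--         return bool(path) and ("zero" not in str(path).lower())
--
--     return {
--         "fdg_non_zero": sum(1 for x in items if valid(x.get("fdg", ""))),
--         "av45_non_zero": sum(1 for x in items if valid(x.get("av45", ""))),
--         "tau_non_zero": sum(1 for x in items if valid(x.get("tau", ""))),
--     }
-- ===== SOURCE B (Python) =====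
-- from typing import Dict, List
--
-- def summarize_tracer(items: List[Dict]) -> Dict[str, int]:
--     def valid(path: str) -> bool:
--         return bool(path) and ("zero" not in str(path).lower())
--
--     keys = ("fdg", "av45", "tau")
--     hits = [k for x in items for k in keys if valid(x.get(k, ""))]
--     return {
--         "fdg_non_zero": hits.count("fdg"),
--         "av45_non_zero": hits.count("av45"),
--         "tau_non_zero": hits.count("tau"),
--     }
-- ===== Notes on version B (the rewrite author's own statement) =====
-- stated objective: alternative
-- what changed: Instead of three generator-sum passes applying valid() per key, B flattens items into a single stream of key tokens (one token per (item,key) pair that passes valid) and builds the result by counting occurrences of each key token in that stream.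
import Mathlib
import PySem

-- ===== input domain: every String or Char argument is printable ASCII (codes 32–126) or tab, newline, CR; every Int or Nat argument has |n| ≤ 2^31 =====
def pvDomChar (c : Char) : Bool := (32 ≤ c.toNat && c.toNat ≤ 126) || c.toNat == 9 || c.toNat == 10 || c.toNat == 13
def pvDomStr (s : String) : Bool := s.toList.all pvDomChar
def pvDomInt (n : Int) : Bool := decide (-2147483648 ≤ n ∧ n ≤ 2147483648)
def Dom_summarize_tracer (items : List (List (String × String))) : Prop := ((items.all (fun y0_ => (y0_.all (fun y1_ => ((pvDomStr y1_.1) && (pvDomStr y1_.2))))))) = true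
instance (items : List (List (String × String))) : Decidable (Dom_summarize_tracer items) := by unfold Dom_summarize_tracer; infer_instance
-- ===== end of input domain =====

-- ===== PORT A =====
-- B replaces A's three per-key generator-sum passes by a flattened stream of passing key tokens counted per key; values proved equal.
-- x.get(k, "")  (dict → assoc list, first match)
def pvGetKey (x : List (String × String)) (k : String) : String :=
  (PySem.Dict.mk x).getD k ""

-- valid(path) = bool(path) and ("zero" not in str(path).lower())
def pvValid (path : String) : Bool :=
  path ≠ "" && !(PySem.Str.isIn "zero" (PySem.Str.lower path))

def summarize_tracer (items : List (List (String × String))) : List (String × Int) :=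
  [("fdg_non_zero", ((items.filter (fun x => pvValid (pvGetKey x "fdg"))).map (fun _ => (1 : Int))).sum),
   ("av45_non_zero", ((items.filter (fun x => pvValid (pvGetKey x "av45"))).map (fun _ => (1 : Int))).sum),
   ("tau_non_zero", ((items.filter (fun x => pvValid (pvGetKey x "tau"))).map (fun _ => (1 : Int))).sum)]

-- ===== PORT B =====
-- hits = [k for x in items for k in keys if valid(x.get(k, ""))]  →  flatMap + filter
def summarize_tracer_alt (items : List (List (String × String))) : List (String × Int) :=
  let keys : List String := ["fdg", "av45", "tau"]
  let hits := items.flatMap (fun x => keys.filter (fun k => pvValid (pvGetKey x k)))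
  [("fdg_non_zero", (hits.count "fdg" : Int)),
   ("av45_non_zero", (hits.count "av45" : Int)),
   ("tau_non_zero", (hits.count "tau" : Int))]

-- ===== PRECONDITION & SPEC =====
def Spec_summarize_tracer (items : List (List (String × String))) (out : List (String × Int)) : Prop := out = summarize_tracer_alt items
instance (items : List (List (String × String))) (out : List (String × Int)) : Decidable (Spec_summarize_tracer items out) := by unfold Spec_summarize_tracer; infer_instance

-- ===== CLAIM =====
def Claim_equal_summarize_tracer : Prop := ∀ (items : List (List (String × String))), Dom_summarize_tracer items → Spec_summarize_tracer items (summarize_tracer items)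

-- ===== LEMMAS AND PROOFS =====

-- counting key k in the flattened hit stream = counting items whose k-path passes valid
theorem pvCount_hits (items : List (List (String × String))) (k : String)
    (hk : k ∈ ["fdg", "av45", "tau"]) :
    (items.flatMap (fun x => (["fdg", "av45", "tau"] : List String).filter
        (fun k' => pvValid (pvGetKey x k')))).count k =
    items.countP (fun x => pvValid (pvGetKey x k)) := by
  induction items with
  | nil => simp
  | cons h t ih =>
    simp only [List.flatMap_cons, List.count_append, List.countP_cons, ih]
    have : ((["fdg", "av45", "tau"] : List String).filter
        (fun k' => pvValid (pvGetKey h k'))).count k =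
        if pvValid (pvGetKey h k) then 1 else 0 := by
      fin_cases hk <;>
        · cases h1 : pvValid (pvGetKey h "fdg") <;>
          cases h2 : pvValid (pvGetKey h "av45") <;>
          cases h3 : pvValid (pvGetKey h "tau") <;>
            simp [List.filter, List.count, h1, h2, h3]
    rw [this]
    split_ifs <;> omega

-- A's per-key 0/1 sum is the countP, as an Int
theorem pvSum_ones (items : List (List (String × String))) (p : List (String × String) → Bool) :
    ((items.filter p).map (fun _ => (1 : Int))).sum = (items.countP p : Int) := by
  induction items with
  | nil => simp
  | cons h t ih =>
    by_cases hp : p h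
    · simp only [List.filter_cons, List.countP_cons, hp, if_true, List.map_cons,
        List.sum_cons, ih]
      push_cast
      ring
    · simpa only [List.filter_cons, List.countP_cons, hp, if_false, Bool.false_eq_true,
        cond_false] using ih

-- ===== VERDICT =====
theorem summarize_tracer_spec : Claim_equal_summarize_tracer := by
  intro items _
  unfold Spec_summarize_tracer summarize_tracer summarize_tracer_alt
  simp only [pvSum_ones,
    pvCount_hits items "fdg" (by simp),
    pvCount_hits items "av45" (by simp),
    pvCount_hits items "tau" (by simp)]
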